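-- pv_equiv track=rewrite | github.com/wilsonkkyip/wilsonkkyip.github.io | tools/cd/linkedin_post.py | find_latest_missing_post
-- ===== SOURCE A (Python) =====
-- def find_latest_missing_post(page_posts, linkedin_posts):
--     page_post_paths = [x.get("path") for x in page_posts]
--     linkedin_post_paths = [x.get("path") for x in linkedin_posts]
--     missing_idx = [
--         i for i, x in enumerate(page_post_paths) if x not in linkedin_post_paths
--     ]
--
--     if missing_idx:
--         missing_paths = [page_post_paths[i] for i in missing_idx]
--         missing_post_dates = [page_posts[i].get("date") for i in missing_idx]
--         latest_missing_post = missing_paths[missing_post_dates.index(max(missing_post_dates))]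
--         latest_missing_post = page_posts[page_post_paths.index(latest_missing_post)]
--     else:
--         latest_missing_post = None
--
--     return latest_missing_post
-- ===== SOURCE B (Python) =====
-- def find_latest_missing_post(page_posts, linkedin_posts):
--     linkedin_paths = {x.get("path") for x in linkedin_posts}
--     first_by_path = {}
--     for p in page_posts:
--         first_by_path.setdefault(p.get("path"), p)
--     ranked = sorted(
--         [p for p in page_posts if p.get("path") not in linkedin_paths],
--         key=lambda p: p.get("date"),
--         reverse=True,
--     )
--     if not ranked:
--         return None
--     return first_by_path[ranked[0].get("path")]
-- ===== Notes on version B (the rewrite author's own statement) =====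
-- stated objective: alternative
-- what changed: Replaces A's index-juggling pipeline (enumerate over paths, parallel index lists, max + two .index re-scans) by a set for linkedin membership, a first-occurrence-per-path dict built once (so the .index re-scan disappears), and a stable descending sort of the candidates whose head is the result's post.
import Mathlib
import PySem

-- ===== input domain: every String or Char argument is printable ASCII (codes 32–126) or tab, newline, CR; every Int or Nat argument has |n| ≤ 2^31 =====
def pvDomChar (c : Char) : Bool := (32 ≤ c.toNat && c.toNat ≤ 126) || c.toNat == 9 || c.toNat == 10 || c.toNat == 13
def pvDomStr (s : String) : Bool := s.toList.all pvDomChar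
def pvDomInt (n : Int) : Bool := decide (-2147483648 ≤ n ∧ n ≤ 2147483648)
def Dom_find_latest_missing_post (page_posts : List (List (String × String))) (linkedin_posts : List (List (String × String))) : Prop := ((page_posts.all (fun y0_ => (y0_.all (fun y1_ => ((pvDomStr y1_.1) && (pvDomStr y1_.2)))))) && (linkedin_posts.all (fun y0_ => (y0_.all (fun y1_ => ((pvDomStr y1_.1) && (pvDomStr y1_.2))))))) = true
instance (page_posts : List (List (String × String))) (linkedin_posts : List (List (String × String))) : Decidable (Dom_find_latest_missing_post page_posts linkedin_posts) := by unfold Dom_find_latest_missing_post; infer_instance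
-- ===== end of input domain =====

-- B replaces A's index-juggling pipeline (enumerate over paths, parallel index lists, max,
-- two .index re-scans) by a set for linkedin membership, a first-occurrence-per-path dict
-- and a stable descending sort of the candidates whose head is the answer (alternative).

-- Python's '>' on dict.get results (None or str); exact whenever the two values actually
-- compared are both strings — Pre_ guarantees every comparison that is executed is.
def pyGtOS : Option String → Option String → Bool
  | some a, some b => decide (b < a)
  | _, _ => false

-- ===== PORT A =====
def find_latest_missing_post (page_posts : List (List (String × String))) (linkedin_posts : List (List (String × String))) : Option (List (String × String)) :=
  let page_post_paths := page_posts.map (fun x => PySem.Dict.get? ⟨x⟩ "path")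
  let linkedin_post_paths := linkedin_posts.map (fun x => PySem.Dict.get? ⟨x⟩ "path")
  let missing_idx := ((PySem.List.enumerate page_post_paths).filter
      (fun ix => !(linkedin_post_paths.contains ix.2))).map (·.1)
  match missing_idx with
  | [] => none
  | i0 :: irest =>
    -- indices come from enumerate, hence are always in range: pyGetD's default is never read
    let missing_paths := (i0 :: irest).map (fun i => PySem.List.pyGetD page_post_paths i none)
    -- max(missing_post_dates) is Python's running-max loop over the nonempty list
    let d0 := PySem.Dict.get? ⟨PySem.List.pyGetD page_posts i0 []⟩ "date"
    let ds := irest.map (fun i => PySem.Dict.get? ⟨PySem.List.pyGetD page_posts i []⟩ "date")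
    let m := ds.foldl (fun acc x => if pyGtOS x acc then x else acc) d0
    match PySem.List.index? (d0 :: ds) m with
    | none => none  -- unreachable: the max is an element of the list (ValueError cannot occur)
    | some j =>
      match PySem.List.pyGet? missing_paths (j : Int) with
      | none => none  -- unreachable: j indexes the list (IndexError cannot occur)
      | some latest =>
        match PySem.List.index? page_post_paths latest with
        | none => none  -- unreachable: latest is an element (ValueError cannot occur)
        | some k => PySem.List.pyGet? page_posts (k : Int)

-- ===== PORT B =====
-- sort key 'p.get("date")' is ported as '(….get? "date").getD ""': exact under Pre_, where
-- every comparison the sort performs is between two present date strings (with ≤ 1 candidate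
-- the sort compares nothing and the default is never compared).
def find_latest_missing_post_alt (page_posts : List (List (String × String))) (linkedin_posts : List (List (String × String))) : Option (List (String × String)) :=
  let linkedin_paths : PySem.Set (Option String) :=
    PySem.Set.ofList (linkedin_posts.map (fun x => PySem.Dict.get? ⟨x⟩ "path"))
  let first_by_path : PySem.Dict (Option String) (List (String × String)) :=
    page_posts.foldl (fun d p => d.setdefault (PySem.Dict.get? ⟨p⟩ "path") p) PySem.Dict.empty
  let ranked := PySem.List.sorted
    (page_posts.filter (fun p => !(PySem.Set.contains linkedin_paths (PySem.Dict.get? ⟨p⟩ "path"))))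
    (fun p => (PySem.Dict.get? (⟨p⟩ : PySem.Dict String String) "date").getD "") true
  match ranked with
  | [] => none
  | r0 :: _ =>
    match first_by_path.get? (PySem.Dict.get? ⟨r0⟩ "path") with
    | none => none  -- unreachable: r0 ∈ page_posts, so its path is a key (KeyError cannot occur)
    | some p => some p

-- ===== PRECONDITION & SPEC =====
-- A raises TypeError (max compares None with None/str) exactly when at least two page posts are
-- missing from linkedin_posts and at least one of them has no "date" value; B raises there too.
-- On every input where the Python A returns, Pre_ holds.
def Pre_find_latest_missing_post (page_posts : List (List (String × String))) (linkedin_posts : List (List (String × String))) : Prop :=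
  (page_posts.filter (fun p => !((linkedin_posts.map (fun x => PySem.Dict.get? (⟨x⟩ : PySem.Dict String String) "path")).contains (PySem.Dict.get? ⟨p⟩ "path")))).length ≤ 1
    ∨ ∀ p ∈ page_posts.filter (fun p => !((linkedin_posts.map (fun x => PySem.Dict.get? (⟨x⟩ : PySem.Dict String String) "path")).contains (PySem.Dict.get? ⟨p⟩ "path"))), (PySem.Dict.get? (⟨p⟩ : PySem.Dict String String) "date").isSome = true
instance (page_posts : List (List (String × String))) (linkedin_posts : List (List (String × String))) : Decidable (Pre_find_latest_missing_post page_posts linkedin_posts) := by unfold Pre_find_latest_missing_post; infer_instance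

def pvWitness_find_latest_missing_post : (List (List (String × String))) × (List (List (String × String))) :=
  ([[("path", "a"), ("date", "2024-01-01")]], [])

def Spec_find_latest_missing_post (page_posts : List (List (String × String))) (linkedin_posts : List (List (String × String))) (out : Option (List (String × String))) : Prop := out = find_latest_missing_post_alt page_posts linkedin_posts
instance (page_posts : List (List (String × String))) (linkedin_posts : List (List (String × String))) (out : Option (List (String × String))) : Decidable (Spec_find_latest_missing_post page_posts linkedin_posts out) := by unfold Spec_find_latest_missing_post; infer_instance

-- ===== CLAIM (what is proved, stated in full; the proofs are below) =====
def Claim_equal_find_latest_missing_post : Prop := ∀ (page_posts : List (List (String × String))) (linkedin_posts : List (List (String × String))), Dom_find_latest_missing_post page_posts linkedin_posts → Pre_find_latest_missing_post page_posts linkedin_posts → Spec_find_latest_missing_post page_posts linkedin_posts (find_latest_missing_post page_posts linkedin_posts)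

-- ===== LEMMAS AND PROOFS =====

-- the "path" / "date" entry of a post, and the string under a present date
def Pg (p : List (String × String)) : Option String := PySem.Dict.get? ⟨p⟩ "path"
def Dg (p : List (String × String)) : Option String := PySem.Dict.get? ⟨p⟩ "date"
def sval (o : Option String) : String := o.getD ""
-- one step of A's running-max over posts, and the same step phrased on sort keys
def bstep (b p : List (String × String)) : List (String × String) :=
  if pyGtOS (Dg p) (Dg b) then p else b
def kstep (b p : List (String × String)) : List (String × String) :=
  if sval (Dg b) < sval (Dg p) then p else b

lemma set_contains_ofList (L : List (Option String)) (v : Option String) :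
    PySem.Set.contains (PySem.Set.ofList L) v = L.contains v := by
  have h1 : PySem.Set.contains (PySem.Set.ofList L) v = true ↔ v ∈ L := by
    rw [PySem.Set.contains_iff, PySem.Set.mem_ofList]
  have h2 : L.contains v = true ↔ v ∈ L := List.contains_iff_mem
  cases h : L.contains v
  · cases hc : PySem.Set.contains (PySem.Set.ofList L) v
    · rfl
    · exact absurd (h1.mp hc) (fun hm => by simp at h; exact h hm)
  · exact h1.mpr (h2.mp h)

lemma enumerate_map {α β : Type} (f : α → β) (l : List α) (s : Int) :
    PySem.List.enumerate (l.map f) s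
      = (PySem.List.enumerate l s).map (fun ix => (ix.1, f ix.2)) := by
  induction l generalizing s with
  | nil => simp [PySem.List.enumerate_nil]
  | cons a t ih => simp [PySem.List.enumerate_cons, ih]

lemma filter_enumerate_snd {α : Type} (q : α → Bool) (l : List α) (s : Int) :
    (((PySem.List.enumerate l s).filter (fun ix => q ix.2)).map (·.2)) = l.filter q := by
  induction l generalizing s with
  | nil => simp [PySem.List.enumerate_nil]
  | cons a t ih =>
    by_cases hq : q a <;> simp [PySem.List.enumerate_cons, hq, ih]

lemma mem_enumerate_get {α : Type} (l : List α) (d : α) {ix : Int × α}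
    (h : ix ∈ PySem.List.enumerate l 0) : PySem.List.pyGetD l ix.1 d = ix.2 := by
  rw [PySem.List.mem_enumerate_iff] at h
  obtain ⟨k, hk, rfl⟩ := h
  simp [PySem.List.pyGetD_natCast, List.getD_eq_getElem?_getD, hk]

lemma pyGtOS_some {o1 o2 : Option String} (h1 : o1.isSome = true) (h2 : o2.isSome = true) :
    pyGtOS o1 o2 = true ↔ sval o2 < sval o1 := by
  cases o1 with
  | none => simp at h1
  | some a => cases o2 with
    | none => simp at h2
    | some b => simp [pyGtOS, sval]

-- A's running max over the mapped dates is the date of the running-best post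
lemma fold_map_dates (rest : List (List (String × String))) :
    ∀ c, (rest.map Dg).foldl (fun acc x => if pyGtOS x acc then x else acc) (Dg c)
      = Dg (rest.foldl bstep c) := by
  induction rest with
  | nil => intro c; rfl
  | cons p r ih =>
    intro c
    simp only [List.map_cons, List.foldl_cons]
    rw [show (if pyGtOS (Dg p) (Dg c) then Dg p else Dg c)
        = Dg (if pyGtOS (Dg p) (Dg c) then p else c) by split <;> rfl]
    exact ih _

-- when every candidate has a date, A's option-comparison step is the sort-key step
lemma fold_bstep_eq_kstep (rest : List (List (String × String))) :
    ∀ c, (∀ x ∈ c :: rest, (Dg x).isSome = true) →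
    rest.foldl bstep c = rest.foldl kstep c := by
  induction rest with
  | nil => intro c _; rfl
  | cons p r ih =>
    intro c hall
    have hc : (Dg c).isSome = true := hall c (by simp)
    have hp : (Dg p).isSome = true := hall p (by simp)
    have hstep : bstep c p = kstep c p := by
      unfold bstep kstep
      by_cases h : sval (Dg c) < sval (Dg p)
      · rw [if_pos ((pyGtOS_some hp hc).mpr h), if_pos h]
      · rw [if_neg (fun hb => h ((pyGtOS_some hp hc).mp hb)), if_neg h]
    simp only [List.foldl_cons, hstep]
    refine ih (kstep c p) (fun x hx => ?_)
    rcases List.mem_cons.mp hx with rfl | hx'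
    · unfold kstep; split
      · exact hp
      · exact hc
    · exact hall x (by simp [hx'])

-- head of the descending stable insertion sort is the running first-max
lemma foldl_insertBy_head {α : Type} (k : α → String) :
    ∀ (l : List α) (a : α) (t : List α),
    (l.foldl (fun acc x => PySem.List.insertBy (fun u v => decide (k v < k u)) x acc) (a :: t)).head?
      = some (l.foldl (fun b x => if k b < k x then x else b) a) := by
  intro l
  induction l with
  | nil => intro a t; rfl
  | cons x l' ih =>
    intro a t
    simp only [List.foldl_cons]
    by_cases h : k a < k x
    · rw [show PySem.List.insertBy (fun u v => decide (k v < k u)) x (a :: t)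
          = x :: a :: t by simp [PySem.List.insertBy, h]]
      rw [ih x (a :: t), if_pos h]
    · rw [show PySem.List.insertBy (fun u v => decide (k v < k u)) x (a :: t)
          = a :: PySem.List.insertBy (fun u v => decide (k v < k u)) x t by
            simp [PySem.List.insertBy, h]]
      rw [ih a _, if_neg h]

-- B's running best is the first maximum: everything before it has a strictly smaller date
lemma firstMax_decomp (rest : List (List (String × String))) :
    ∀ c, (∀ x ∈ c :: rest, (Dg x).isSome = true) →
    ∃ pre suf, c :: rest = pre ++ (rest.foldl bstep c) :: suf ∧
      (∀ x ∈ pre, sval (Dg x) < sval (Dg (rest.foldl bstep c))) ∧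
      (∀ x ∈ c :: rest, sval (Dg x) ≤ sval (Dg (rest.foldl bstep c))) := by
  induction rest with
  | nil =>
    intro c _
    exact ⟨[], [], rfl, by simp, by simp⟩
  | cons p r ih =>
    intro c hall
    have hc : (Dg c).isSome = true := hall c (by simp)
    have hp : (Dg p).isSome = true := hall p (by simp)
    by_cases hgt : pyGtOS (Dg p) (Dg c) = true
    · have hb : (p :: r).foldl bstep c = r.foldl bstep p := by
        simp only [List.foldl_cons, bstep, hgt, if_true]
      rw [hb]
      obtain ⟨pre', suf', hdec, hpre, hle⟩ :=
        ih p (fun x hx => hall x (List.mem_cons_of_mem _ hx))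
      refine ⟨c :: pre', suf', ?_, ?_, ?_⟩
      · simpa using congrArg (List.cons c) hdec
      · intro x hx
        rcases List.mem_cons.mp hx with rfl | hx'
        · exact lt_of_lt_of_le ((pyGtOS_some hp hc).mp hgt) (hle p (by simp))
        · exact hpre x hx'
      · intro x hx
        rcases List.mem_cons.mp hx with rfl | hx'
        · exact le_of_lt (lt_of_lt_of_le ((pyGtOS_some hp hc).mp hgt) (hle p (by simp)))
        · exact hle x hx'
    · have hb : (p :: r).foldl bstep c = r.foldl bstep c := by
        simp only [List.foldl_cons, bstep, if_neg hgt]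
      rw [hb]
      set B := r.foldl bstep c with hB
      have hpc : sval (Dg p) ≤ sval (Dg c) := by
        by_contra hlt
        exact hgt ((pyGtOS_some hp hc).mpr (lt_of_not_ge hlt))
      obtain ⟨pre', suf', hdec, hpre, hle⟩ :=
        ih c (fun x hx => by
          rcases List.mem_cons.mp hx with rfl | hx'
          · exact hall x (by simp)
          · exact hall x (List.mem_cons_of_mem _ (List.mem_cons_of_mem _ hx')))
      cases pre' with
      | nil =>
        have hc2 : c = B ∧ r = suf' := by simpa using hdec
        refine ⟨[], p :: r, ?_, by simp, ?_⟩
        · simp [← hc2.1]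
        · intro x hx
          rcases List.mem_cons.mp hx with rfl | hx'
          · exact hle x (by simp)
          · rcases List.mem_cons.mp hx' with rfl | hx''
            · exact le_trans hpc (hle c (by simp))
            · exact hle x (by simp [hx''])
      | cons a pre'' =>
        have hc2 : c = a ∧ r = pre'' ++ B :: suf' := by simpa using hdec
        have hclt : sval (Dg c) < sval (Dg B) := by
          have := hpre a (by simp)
          rwa [← hc2.1] at this
        refine ⟨c :: p :: pre'', suf', ?_, ?_, ?_⟩
        · rw [hc2.2]; simp
        · intro x hx
          rcases List.mem_cons.mp hx with rfl | hx'
          · exact hclt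
          · rcases List.mem_cons.mp hx' with rfl | hx''
            · exact lt_of_le_of_lt hpc hclt
            · exact hpre x (by simp [← hc2.1, hx''])
        · intro x hx
          rcases List.mem_cons.mp hx with rfl | hx'
          · exact le_of_lt hclt
          · rcases List.mem_cons.mp hx' with rfl | hx''
            · exact le_of_lt (lt_of_le_of_lt hpc hclt)
            · exact hle x (by simp [hx''])

-- .index finds the head of the suffix when everything in the prefix avoids the value
lemma index?_first {α β : Type} [BEq β] [LawfulBEq β] (f : α → β) (b : α) (suf : List α) :
    ∀ pre : List α, (∀ x ∈ pre, ¬ (f x = f b)) →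
    PySem.List.index? ((pre ++ b :: suf).map f) (f b) = some pre.length := by
  intro pre
  induction pre with
  | nil =>
    intro _
    simp only [List.nil_append, List.map_cons]
    exact PySem.List.index?_cons_self _ _
  | cons a t ih =>
    intro h
    have hne : f a ≠ f b := h a (by simp)
    simp only [List.cons_append, List.map_cons]
    rw [PySem.List.index?_cons_of_ne _ hne, ih (fun x hx => h x (by simp [hx]))]
    rfl

lemma pyGet?_append_length {α β : Type} (f : α → β) (b : α) (suf : List α) (pre : List α) :
    PySem.List.pyGet? ((pre ++ b :: suf).map f) (pre.length : Int) = some (f b) := by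
  rw [PySem.List.pyGet?_natCast]
  simp

-- A's first-index lookup plus indexing is "first post with this path"
lemma index?_resolve (pp : List (List (String × String))) (target : Option String) :
    (match PySem.List.index? (pp.map Pg) target with
     | none => (none : Option (List (String × String)))
     | some k => PySem.List.pyGet? pp (k : Int))
      = pp.find? (fun p => Pg p == target) := by
  induction pp with
  | nil => rfl
  | cons h t ih =>
    by_cases hq : Pg h = target
    · subst hq
      rw [List.find?_cons_of_pos (l := t) (by simp)]
      simp only [List.map_cons, PySem.List.index?_cons_self]
      rw [show ((0:Nat):Int) = 0 from rfl]
      simp [PySem.List.pyGet?, PySem.List.pyIdx?]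
    · rw [List.find?_cons_of_neg (l := t) (by simp [hq]), ← ih]
      simp only [List.map_cons]
      rw [PySem.List.index?_cons_of_ne _ hq]
      cases PySem.List.index? (t.map Pg) target with
      | none => rfl
      | some k =>
        simp only [Option.map_some]
        show PySem.List.pyGet? (h :: t) ((k+1 : Nat) : Int) = PySem.List.pyGet? t (k : Int)
        rw [PySem.List.pyGet?_natCast, PySem.List.pyGet?_natCast]
        simp

-- B's first-occurrence dict, looked up, is "first post with this path"
lemma get?_foldl_setdefault_some (l : List (List (String × String)))
    (d : PySem.Dict (Option String) (List (String × String))) (t : Option String)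
    (v : List (String × String)) (h : d.get? t = some v) :
    (l.foldl (fun d p => d.setdefault (Pg p) p) d).get? t = some v := by
  induction l generalizing d with
  | nil => exact h
  | cons p l' ih =>
    simp only [List.foldl_cons]
    refine ih _ ?_
    by_cases hq : t = Pg p
    · subst hq
      rw [PySem.Dict.get?_setdefault_self, h]
      rfl
    · rw [PySem.Dict.get?_setdefault_of_ne _ _ hq, h]

lemma get?_foldl_setdefault_none (l : List (List (String × String))) :
    ∀ (d : PySem.Dict (Option String) (List (String × String))) (t : Option String),
    d.get? t = none →
    (l.foldl (fun d p => d.setdefault (Pg p) p) d).get? t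
      = l.find? (fun p => Pg p == t) := by
  induction l with
  | nil => intro d t h; simpa using h
  | cons p l' ih =>
    intro d t h
    simp only [List.foldl_cons]
    by_cases hq : Pg p = t
    · rw [List.find?_cons_of_pos (l := l') (by simp [hq])]
      refine get?_foldl_setdefault_some l' _ t p ?_
      subst hq
      rw [PySem.Dict.get?_setdefault_self, h]
      rfl
    · rw [List.find?_cons_of_neg (l := l') (by simp [hq])]
      refine ih _ t ?_
      rw [PySem.Dict.get?_setdefault_of_ne _ _ (fun he => hq he.symm), h]

lemma main_equiv (pp lp : List (List (String × String)))
    (hpre : (pp.filter (fun p => !((lp.map (fun x => PySem.Dict.get? (⟨x⟩ : PySem.Dict String String) "path")).contains (PySem.Dict.get? ⟨p⟩ "path")))).length ≤ 1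
      ∨ ∀ p ∈ pp.filter (fun p => !((lp.map (fun x => PySem.Dict.get? (⟨x⟩ : PySem.Dict String String) "path")).contains (PySem.Dict.get? ⟨p⟩ "path"))), (PySem.Dict.get? (⟨p⟩ : PySem.Dict String String) "date").isSome = true) :
    find_latest_missing_post pp lp = find_latest_missing_post_alt pp lp := by
  have hPg : ∀ p, PySem.Dict.get? (⟨p⟩ : PySem.Dict String String) "path" = Pg p := fun _ => rfl
  have hDg : ∀ p, PySem.Dict.get? (⟨p⟩ : PySem.Dict String String) "date" = Dg p := fun _ => rfl
  simp only [find_latest_missing_post, find_latest_missing_post_alt]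
  simp only [hPg, hDg] at *
  have hset : (fun p : List (String × String) => !(PySem.Set.contains (PySem.Set.ofList (lp.map Pg)) (Pg p))) = (fun p => !((lp.map Pg).contains (Pg p))) :=
    funext (fun p => by rw [set_contains_ofList])
  rw [hset]
  rw [enumerate_map Pg pp 0, List.filter_map]
  simp only [Function.comp_def, List.map_map]
  have hFsnd := filter_enumerate_snd (fun p => !((lp.map Pg).contains (Pg p))) pp 0
  cases hF : (PySem.List.enumerate pp 0).filter (fun x => !((lp.map Pg).contains (Pg x.2))) with
  | nil =>
    rw [hF] at hFsnd
    rw [← hFsnd]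
    rfl
  | cons f0 fr =>
    rw [hF] at hFsnd
    rw [← hFsnd]
    have hmem : ∀ ix ∈ f0 :: fr, ix ∈ PySem.List.enumerate pp 0 := by
      intro ix hx
      rw [← hF] at hx
      exact (List.mem_filter.mp hx).1
    have hmemP : ∀ ix ∈ f0 :: fr, PySem.List.pyGetD (pp.map Pg) ix.1 none = Pg ix.2 := by
      intro ix hx
      have : (ix.1, Pg ix.2) ∈ PySem.List.enumerate (pp.map Pg) 0 := by
        rw [enumerate_map Pg pp 0]
        exact List.mem_map.mpr ⟨ix, hmem ix hx, rfl⟩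
      exact mem_enumerate_get (pp.map Pg) none this
    have hd0 : PySem.List.pyGetD pp f0.1 [] = f0.2 :=
      mem_enumerate_get pp [] (hmem f0 (by simp))
    have hds : (fr.map (fun x => x.1)).map (fun i => Dg (PySem.List.pyGetD pp i [])) = (fr.map (fun x => x.2)).map Dg := by
      rw [List.map_map, List.map_map]
      exact List.map_congr_left (fun ix hx => by
        simp only [Function.comp_apply]
        rw [mem_enumerate_get pp [] (hmem ix (List.mem_cons_of_mem _ hx))])
    have hpaths : (f0.1 :: fr.map (fun x => x.1)).map (fun i => PySem.List.pyGetD (pp.map Pg) i none) = (f0.2 :: fr.map (fun x => x.2)).map Pg := by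
      simp only [List.map_cons, List.map_map]
      rw [hmemP f0 (by simp)]
      congr 1
      exact List.map_congr_left (fun ix hx => by
        simp only [Function.comp_apply]
        rw [hmemP ix (List.mem_cons_of_mem _ hx)])
    simp only [List.map_cons] at hpre ⊢
    rw [hd0, hds]
    rw [show (PySem.List.pyGetD (List.map Pg pp) f0.1 none :: List.map (fun i => PySem.List.pyGetD (List.map Pg pp) i none) (List.map (fun x => x.1) fr)) = List.map Pg (f0.2 :: List.map (fun x => x.2) fr) from by simpa using hpaths]
    rw [← hFsnd] at hpre
    simp only [List.map_cons, List.length_cons] at hpre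
    rw [fold_map_dates (List.map (fun x => x.2) fr) f0.2]
    rw [show (fun p : List (String × String) => (Dg p).getD "") = (fun p => sval (Dg p)) from rfl]
    -- name the candidate tail and the chosen best
    set cs := List.map (fun x => x.2) fr with hcs
    set c := f0.2 with hc
    set best := cs.foldl bstep c with hbest
    -- B's side: head of the descending sort is the same best
    have hsorted : (PySem.List.sorted (c :: cs) (fun p => sval (Dg p)) true).head? = some best := by
      rw [PySem.List.sorted_rev_eq_foldl_insertBy]
      simp only [List.foldl_cons]
      rw [show PySem.List.insertBy (fun u v => decide (sval (Dg v) < sval (Dg u))) c [] = [c] from rfl]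
      rw [foldl_insertBy_head (fun p => sval (Dg p)) cs c []]
      rw [hbest]
      rcases hpre with hlen | hall
      · have : cs = [] := by
          cases h : cs with
          | nil => rfl
          | cons a t => rw [hcs] at hlen; rw [← hcs, h] at hlen; simp at hlen
        rw [this]
        rfl
      · congr 1
        exact (fold_bstep_eq_kstep cs c hall).symm
    -- decompose around the first maximum to resolve A's .index steps
    obtain ⟨pre, suf, hsplit, hne⟩ :
        ∃ pre suf, c :: cs = pre ++ best :: suf ∧
          ∀ x ∈ pre, ¬ (Dg x = Dg best) := by
      rcases hpre with hlen | hall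
      · have hrest : cs = [] := by
          cases h : cs with
          | nil => rfl
          | cons a t => rw [hcs] at hlen; rw [← hcs, h] at hlen; simp at hlen
        rw [hrest]
        exact ⟨[], [], by rw [hbest, hrest]; rfl, by simp⟩
      · obtain ⟨pre, suf, hd, hlt, _⟩ := firstMax_decomp cs c hall
        exact ⟨pre, suf, hd, fun x hx heq => absurd (hlt x hx) (by rw [← hbest] at *; rw [heq]; exact lt_irrefl _)⟩
    rw [← List.map_cons]
    rw [hsplit]
    rw [index?_first Dg _ suf pre hne]
    simp only [pyGet?_append_length Pg best suf pre]
    rw [index?_resolve pp (Pg best)]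
    -- B's match on the sorted list
    cases hs : PySem.List.sorted (pre ++ best :: suf) (fun p => sval (Dg p)) true with
    | nil =>
      exact absurd ((PySem.List.sorted_eq_nil_iff _ _ _).mp hs) (by simp)
    | cons r0 rr =>
      rw [← hsplit] at hs
      rw [hs] at hsorted
      simp only [List.head?_cons, Option.some.injEq] at hsorted
      rw [hsorted]
      show pp.find? (fun p => Pg p == Pg best)
          = match (pp.foldl (fun d p => d.setdefault (Pg p) p) PySem.Dict.empty).get? (Pg best) with
            | none => none
            | some p => some p
      rw [get?_foldl_setdefault_none pp PySem.Dict.empty (Pg best) rfl]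
      cases hfind : pp.find? (fun p => Pg p == Pg best) with
      | none => rfl
      | some v => rfl

-- ===== VERDICT (by name: the statement is the Claim_ definition above) =====
theorem find_latest_missing_post_spec : Claim_equal_find_latest_missing_post := by
  intro pp lp _ hpre
  unfold Spec_find_latest_missing_post
  unfold Pre_find_latest_missing_post at hpre
  exact main_equiv pp lp hpre
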